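-- pv_equiv track=rewrite | github.com/Sierraki/Solutions | Leetcode/算法&Algorithm/周赛/467周赛/Q3.含上限元素的子序列和.py | subsequenceSumAfterCapping
-- ===== SOURCE A (Python) =====
-- from typing import List
--
-- def subsequenceSumAfterCapping(nums: List[int], k: int) -> List[bool]:
--     n = len(nums)
--     answer = [False] * n
--     nums.sort()
--     dp = [False] * (k + 1)
--     dp[0] = True
--     i = 0
--     for x in range(1, n + 1):
--         while i < n and nums[i] <= x:
--             num = nums[i]
--             for j in range(k, num - 1, -1):
--                 if dp[j - num]:
--                     dp[j] = True
--             i += 1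
--         cnt = n - i
--         for j in range(k + 1):
--             if dp[j]:
--                 left = k - j
--                 if left >= 0 and left % x == 0:
--                     tar = left // x
--                     if tar <= cnt:
--                         answer[x - 1] = True
--                         break
--     return answer
-- ===== SOURCE B (Python) =====
-- from typing import List
--
-- def subsequenceSumAfterCapping(nums: List[int], k: int) -> List[bool]:
--     # Per-cap bitset subset-sum: for each cap x, fold every element's capped value
--     # into a bitmask of achievable sums <= k, then read bit k.
--     # (Return-value equivalence only: A sorts nums in place, B leaves nums as given.)
--     n = len(nums)
--     mask = (1 << (k + 1)) - 1
--     answer = []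
--     for x in range(1, n + 1):
--         bits = 1
--         for v in nums:
--             c = v if v < x else x
--             bits = (bits | (bits << c)) & mask
--         answer.append(bits >> k & 1 == 1)
--     return answer
-- ===== Notes on version B (the rewrite author's own statement) =====
-- stated objective: alternative
-- what changed: A sorts nums and maintains one incremental boolean DP over the small elements with a two-pointer sweep plus a per-cap divisibility/count scan; B instead recomputes, for each cap x independently, a bitset subset-sum over the capped values min(v,x) and reads bit k.
import Mathlib
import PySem

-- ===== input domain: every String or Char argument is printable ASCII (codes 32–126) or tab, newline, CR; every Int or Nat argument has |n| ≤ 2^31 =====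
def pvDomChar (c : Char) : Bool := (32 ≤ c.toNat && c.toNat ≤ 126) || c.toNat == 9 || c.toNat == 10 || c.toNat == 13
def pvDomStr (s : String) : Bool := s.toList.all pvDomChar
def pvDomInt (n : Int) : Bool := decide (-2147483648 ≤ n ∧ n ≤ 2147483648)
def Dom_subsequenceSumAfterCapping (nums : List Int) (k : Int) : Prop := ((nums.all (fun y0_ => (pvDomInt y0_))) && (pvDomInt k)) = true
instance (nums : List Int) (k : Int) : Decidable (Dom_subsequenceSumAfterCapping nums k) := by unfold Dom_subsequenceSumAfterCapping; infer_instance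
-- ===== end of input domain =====

-- B replaces A's sorted incremental DP + per-cap divisibility count by an independent
-- per-cap bitset subset-sum over the capped values (simpler per-cap logic; A sorts nums
-- in place, B does not mutate it — the equivalence proved here is about the return value).


-- ===== PORT A =====
-- inner `for j in range(k, num - 1, -1): if dp[j - num]: dp[j] = True`
def pvKnapLoop (num : Int) (j : Int) (dp : Array Bool) : Array Bool :=
  if _h : num ≤ j then
    pvKnapLoop num (j - 1)
      (if dp.getD (j - num).toNat false then dp.setIfInBounds j.toNat true else dp)
  else dp
termination_by (j - num + 1).toNat
decreasing_by all_goals omega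

-- `while i < n and nums[i] <= x: …`
def pvWhileLoop (snums : List Int) (k x : Int) (i : Nat) (dp : Array Bool) :
    Nat × Array Bool :=
  if _h : i < snums.length ∧ snums.getD i 0 ≤ x then
    pvWhileLoop snums k x (i + 1) (pvKnapLoop (snums.getD i 0) k dp)
  else (i, dp)
termination_by snums.length - i
decreasing_by all_goals omega

-- `for j in range(k + 1): if dp[j]: … break`
def pvScanLoop (dp : Array Bool) (k x cnt : Int) (j : Int) : Bool :=
  if _h : j < k + 1 then
    if dp.getD j.toNat false then
      if 0 ≤ k - j ∧ PySem.Int.mod (k - j) x = 0 ∧ PySem.Int.floordiv (k - j) x ≤ cnt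
      then true
      else pvScanLoop dp k x cnt (j + 1)
    else pvScanLoop dp k x cnt (j + 1)
  else false
termination_by (k + 1 - j).toNat
decreasing_by all_goals omega

-- `for x in range(1, n + 1): …`
def pvOuterLoop (snums : List Int) (k : Int) (n : Nat) (x : Int)
    (answer : List Bool) (i : Nat) (dp : Array Bool) : List Bool :=
  if _h : x < (n : Int) + 1 then
    let w := pvWhileLoop snums k x i dp
    let cnt : Int := (n : Int) - (w.1 : Int)
    let found := pvScanLoop w.2 k x cnt 0
    pvOuterLoop snums k n (x + 1)
      (if found then answer.set (x - 1).toNat true else answer) w.1 w.2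
  else answer
termination_by ((n : Int) + 1 - x).toNat
decreasing_by all_goals omega

def subsequenceSumAfterCapping (nums : List Int) (k : Int) : List Bool :=
  let n := nums.length
  let answer := List.replicate n false
  let snums := PySem.List.sorted nums (fun v => v) false
  let dp := (Array.replicate (k + 1).toNat false).setIfInBounds 0 true
  pvOuterLoop snums k n 1 answer 0 dp

-- ===== PORT B =====
-- `bits = (bits | (bits << c)) & mask` with mask = (1 << (k+1)) - 1
def pvCapStep (k x : Int) (bits : Nat) (v : Int) : Nat :=
  let c : Int := if v < x then v else x
  (bits ||| (bits <<< c.toNat)) &&& ((1 <<< (k + 1).toNat) - 1)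

def subsequenceSumAfterCapping_alt (nums : List Int) (k : Int) : List Bool :=
  (PySem.List.pyRange 1 ((nums.length : Int) + 1) 1).map (fun x =>
    ((nums.foldl (pvCapStep k x) 1) >>> k.toNat) &&& 1 == 1)

-- ===== PRECONDITION & SPEC =====
-- Pre_ excludes exactly the inputs on which A raises (IndexError): negative k
-- (dp[0] = True on an empty table) and negative elements (dp[j - num] past the end).
def Pre_subsequenceSumAfterCapping (nums : List Int) (k : Int) : Prop :=
  0 ≤ k ∧ ∀ v ∈ nums, 0 ≤ v
instance (nums : List Int) (k : Int) : Decidable (Pre_subsequenceSumAfterCapping nums k) := by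
  unfold Pre_subsequenceSumAfterCapping; infer_instance

def pvWitness_subsequenceSumAfterCapping : List Int × Int := ([2, 1, 3], 4)

def Spec_subsequenceSumAfterCapping (nums : List Int) (k : Int) (out : List Bool) : Prop := out = subsequenceSumAfterCapping_alt nums k
instance (nums : List Int) (k : Int) (out : List Bool) : Decidable (Spec_subsequenceSumAfterCapping nums k out) := by unfold Spec_subsequenceSumAfterCapping; infer_instance

-- ===== CLAIM (what is proved, stated in full; the proofs are below) =====
def Claim_equal_subsequenceSumAfterCapping : Prop := ∀ (nums : List Int) (k : Int), Dom_subsequenceSumAfterCapping nums k → Pre_subsequenceSumAfterCapping nums k → Spec_subsequenceSumAfterCapping nums k (subsequenceSumAfterCapping nums k)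

-- ===== LEMMAS AND PROOFS =====

-- achievable (0/1-)subset sums of a list: the semantic yardstick for both ports
def pvReach : List Int → Int → Bool
  | [], s => s == 0
  | a :: l, s => pvReach l s || pvReach l (s - a)

-- the common per-cap semantic value: can some capped subsequence sum to k?
def pvSem (nums : List Int) (k x : Int) : Bool :=
  pvReach (nums.map (fun v => if v < x then v else x)) k

theorem pvAGetD_set_self (a : Array Bool) (i : Nat) (v : Bool) (h : i < a.size) :
    (a.setIfInBounds i v).getD i false = v := by
  simp [Array.getD, h]

theorem pvAGetD_set_ne (a : Array Bool) (i j : Nat) (v : Bool) (h : i ≠ j) :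
    (a.setIfInBounds i v).getD j false = a.getD j false := by
  simp [Array.getD]
  split
  · rw [Array.getElem_setIfInBounds_ne]; omega
  · rfl

theorem pvReach_perm {l l' : List Int} (h : l.Perm l') : ∀ s, pvReach l s = pvReach l' s := by
  induction h with
  | nil => intro s; rfl
  | cons a _ ih => intro s; simp [pvReach, ih]
  | swap a b l =>
      intro s
      have e : s - b - a = s - a - b := by ring
      simp [pvReach, e]
      ac_rfl
  | trans _ _ ih1 ih2 => intro s; rw [ih1, ih2]

theorem pvReach_neg {l : List Int} (h : ∀ a ∈ l, 0 ≤ a) : ∀ s : Int, s < 0 → pvReach l s = false := by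
  induction l with
  | nil => intro s hs; simp [pvReach]; omega
  | cons a l ih =>
      intro s hs
      have ha : 0 ≤ a := h a (by simp)
      have h' : ∀ b ∈ l, 0 ≤ b := fun b hb => h b (by simp [hb])
      simp [pvReach, ih h' s hs, ih h' (s - a) (by omega)]

theorem pvCapStep_testBit (k x : Int) (hk : 0 ≤ k) (bits : Nat) (v : Int) (hv : 0 ≤ v) (hx : 0 ≤ x)
    (proc : List Int) (hproc : ∀ a ∈ proc, 0 ≤ a)
    (hinv : ∀ s : Nat, bits.testBit s = (pvReach proc (s : Int) && decide (s ≤ k.toNat)))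
    (s : Nat) :
    (pvCapStep k x bits v).testBit s
      = (pvReach ((if v < x then v else x) :: proc) (s : Int) && decide (s ≤ k.toNat)) := by
  set c : Int := if v < x then v else x with hc
  have hc0 : 0 ≤ c := by rw [hc]; split <;> omega
  have hmask : (1 <<< (k + 1).toNat) - 1 = 2 ^ (k.toNat + 1) - 1 := by
    rw [Nat.one_shiftLeft]; congr 1; congr 1; omega
  rw [pvCapStep]
  simp only [← hc, hmask, Nat.testBit_and, Nat.testBit_or, Nat.testBit_shiftLeft,
    Nat.testBit_two_pow_sub_one, hinv]
  by_cases hsk : s ≤ k.toNat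
  · simp only [decide_eq_true (by omega : s < k.toNat + 1), decide_eq_true hsk, Bool.and_true]
    by_cases hcs : c.toNat ≤ s
    · have hcast : ((s - c.toNat : Nat) : Int) = (s : Int) - c := by omega
      have h2 : s - c.toNat ≤ k.toNat := by omega
      simp [pvReach, hcast, decide_eq_true (show c ≤ (s : Int) by omega),
        decide_eq_true (show s ≤ k.toNat + c.toNat by omega)]
    · have hneg : ((s : Int) - c) < 0 := by omega
      simp [pvReach, pvReach_neg hproc _ hneg]
      intro h; exfalso; omega
  · simp [pvReach, decide_eq_false hsk]

theorem pvCapFold_testBit (k x : Int) (hk : 0 ≤ k) (hx : 0 ≤ x) :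
    ∀ (l proc : List Int) (bits : Nat),
      (∀ v ∈ l, 0 ≤ v) → (∀ a ∈ proc, 0 ≤ a) →
      (∀ s : Nat, bits.testBit s = (pvReach proc (s : Int) && decide (s ≤ k.toNat))) →
      ∀ s : Nat, (l.foldl (pvCapStep k x) bits).testBit s
        = (pvReach ((l.map (fun v => if v < x then v else x)).reverse ++ proc) (s : Int)
            && decide (s ≤ k.toNat)) := by
  intro l
  induction l with
  | nil => intro proc bits _ _ hinv s; simpa using hinv s
  | cons v l ih =>
      intro proc bits hl hproc hinv s
      have hv : 0 ≤ v := hl v (by simp)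
      have step := pvCapStep_testBit k x hk bits v hv hx proc hproc hinv
      have hproc' : ∀ a ∈ ((if v < x then v else x) :: proc), 0 ≤ a := by
        intro a ha
        rcases List.mem_cons.1 ha with h | h
        · subst h; split <;> omega
        · exact hproc a h
      have := ih ((if v < x then v else x) :: proc) (pvCapStep k x bits v) (fun w hw => hl w (by simp [hw])) hproc' step s
      simpa [List.foldl_cons, List.append_assoc] using this

theorem pvKnapLoop_size (num j : Int) (dp : Array Bool) :
    (pvKnapLoop num j dp).size = dp.size := by
  induction j, dp using pvKnapLoop.induct num with
  | case1 j dp h ih => rw [pvKnapLoop]; simp [h] at ih ⊢; split at ih <;> simp_all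
  | case2 j dp h => rw [pvKnapLoop]; simp [h]

theorem pvKnapLoop_getD (num : Int) (hnum : 0 ≤ num) :
    ∀ (j : Int) (dp : Array Bool), j < (dp.size : Int) →
      ∀ s : Nat, (pvKnapLoop num j dp).getD s false
        = (dp.getD s false
            || (decide (num ≤ (s : Int) ∧ (s : Int) ≤ j) && dp.getD (s - num.toNat) false)) := by
  intro j dp
  induction j, dp using pvKnapLoop.induct num with
  | case2 j dp h =>
      intro _ s
      rw [pvKnapLoop]; simp only [dif_neg h]
      have : ¬ (num ≤ (s : Int) ∧ (s : Int) ≤ j) := by omega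
      simp [this]
  | case1 j dp h ih =>
      intro hlen s
      rw [pvKnapLoop]; simp only [dif_pos h]
      have hjnat : ((j.toNat : Int)) = j := by omega
      by_cases hw : dp.getD (j - num).toNat false
      · rw [if_pos hw]
        have key := ih (by simp only [dite_eq_ite, if_pos hw]; simp; omega) s
        simp only [dite_eq_ite, if_pos hw] at key
        rw [key]
        by_cases hsj : (s : Int) = j
        · have hs_eq : s = j.toNat := by omega
          have hjl : j.toNat < dp.size := by omega
          have hset : (dp.setIfInBounds j.toNat true).getD s false = true := by
            rw [hs_eq]; exact pvAGetD_set_self dp _ _ hjl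
          have hw' : dp.getD (s - num.toNat) false = true := by
            rw [show s - num.toNat = (j - num).toNat by omega]; exact hw
          rw [hset, decide_eq_false (show ¬ (num ≤ (s:Int) ∧ (s:Int) ≤ j - 1) by omega),
            decide_eq_true (show (num ≤ (s:Int) ∧ (s:Int) ≤ j) by omega), hw']
          simp
        · have h1 : (dp.setIfInBounds j.toNat true).getD s false = dp.getD s false :=
            pvAGetD_set_ne dp _ _ _ (by omega)
          rw [h1]
          by_cases hcond : num ≤ (s : Int) ∧ (s : Int) ≤ j - 1
          · have h2 : (dp.setIfInBounds j.toNat true).getD (s - num.toNat) false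
                = dp.getD (s - num.toNat) false :=
              pvAGetD_set_ne dp _ _ _ (by omega)
            rw [h2, decide_eq_true hcond,
              decide_eq_true (show (num ≤ (s:Int) ∧ (s:Int) ≤ j) by omega)]
          · rw [decide_eq_false hcond,
              decide_eq_false (show ¬ (num ≤ (s:Int) ∧ (s:Int) ≤ j) by omega)]
            simp
      · rw [if_neg hw]
        have key := ih (by simp only [dite_eq_ite, if_neg hw]; exact (by omega)) s
        simp only [dite_eq_ite, if_neg hw] at key
        rw [key]
        by_cases hsj : (s : Int) = j
        · have hw' : dp.getD (s - num.toNat) false = false := by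
            rw [show s - num.toNat = (j - num).toNat by omega]
            exact Bool.not_eq_true _ ▸ (by simpa using hw)
          rw [hw', decide_eq_false (show ¬ (num ≤ (s:Int) ∧ (s:Int) ≤ j - 1) by omega)]
          simp
        · by_cases hcond : num ≤ (s : Int) ∧ (s : Int) ≤ j - 1
          · rw [decide_eq_true hcond,
              decide_eq_true (show (num ≤ (s:Int) ∧ (s:Int) ≤ j) by omega)]
          · rw [decide_eq_false hcond,
              decide_eq_false (show ¬ (num ≤ (s:Int) ∧ (s:Int) ≤ j) by omega)]

theorem pvKnap_inv (k num : Int) (hk : 0 ≤ k) (hnum : 0 ≤ num)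
    (proc : List Int) (hproc : ∀ a ∈ proc, 0 ≤ a) (dp : Array Bool)
    (hlen : dp.size = k.toNat + 1)
    (hinv : ∀ s : Nat, dp.getD s false = (pvReach proc (s : Int) && decide (s ≤ k.toNat))) :
    ∀ s : Nat, (pvKnapLoop num k dp).getD s false
      = (pvReach (num :: proc) (s : Int) && decide (s ≤ k.toNat)) := by
  intro s
  rw [pvKnapLoop_getD num hnum k dp (by omega) s, hinv s, hinv (s - num.toNat)]
  by_cases hsK : s ≤ k.toNat
  · by_cases hns : num ≤ (s : Int)
    · have hcast : ((s - num.toNat : Nat) : Int) = (s : Int) - num := by omega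
      rw [hcast, decide_eq_true (show (num ≤ (s:Int) ∧ (s:Int) ≤ k) by omega),
        decide_eq_true hsK, decide_eq_true (show s - num.toNat ≤ k.toNat by omega)]
      simp [pvReach]
    · rw [decide_eq_false (show ¬ (num ≤ (s:Int) ∧ (s:Int) ≤ k) by omega), decide_eq_true hsK]
      simp [pvReach, pvReach_neg hproc ((s : Int) - num) (by omega)]
  · rw [decide_eq_false (show ¬ (num ≤ (s:Int) ∧ (s:Int) ≤ k) by omega), decide_eq_false hsK]
    simp

theorem pvWhile_inv (k x : Int) (hk : 0 ≤ k) (snums : List Int)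
    (hsort : snums.Pairwise (· ≤ ·)) (hnn : ∀ v ∈ snums, 0 ≤ v) :
    ∀ (i : Nat) (dp : Array Bool), i ≤ snums.length →
      dp.size = k.toNat + 1 →
      (∀ s : Nat, dp.getD s false = (pvReach (snums.take i) (s : Int) && decide (s ≤ k.toNat))) →
      (∀ a ∈ snums.take i, a ≤ x) →
      i ≤ (pvWhileLoop snums k x i dp).1 ∧
      (pvWhileLoop snums k x i dp).1 ≤ snums.length ∧
      (∀ a ∈ snums.take (pvWhileLoop snums k x i dp).1, a ≤ x) ∧
      (∀ a ∈ snums.drop (pvWhileLoop snums k x i dp).1, x < a) ∧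
      (pvWhileLoop snums k x i dp).2.size = k.toNat + 1 ∧
      (∀ s : Nat, (pvWhileLoop snums k x i dp).2.getD s false
        = (pvReach (snums.take (pvWhileLoop snums k x i dp).1) (s : Int) && decide (s ≤ k.toNat))) := by
  intro i dp
  induction i, dp using pvWhileLoop.induct snums k x with
  | case1 i dp h ih =>
      intro hi hlen hinv hpre
      rw [pvWhileLoop]; simp only [dif_pos h]
      obtain ⟨hilt, hle⟩ := h
      have hgd : snums.getD i 0 = snums[i] := List.getD_eq_getElem _ _ hilt
      have hmem : snums[i] ∈ snums := List.getElem_mem hilt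
      have hnum : 0 ≤ snums.getD i 0 := by rw [hgd]; exact hnn _ hmem
      have htake : snums.take (i + 1) = snums.take i ++ [snums[i]] := by
        rw [List.take_add_one]; simp [List.getElem?_eq_getElem hilt]
      have hproc : ∀ a ∈ snums.take i, 0 ≤ a := fun a ha => hnn a (List.mem_of_mem_take ha)
      have hinv' : ∀ s : Nat, (pvKnapLoop (snums.getD i 0) k dp).getD s false
          = (pvReach (snums.take (i + 1)) (s : Int) && decide (s ≤ k.toNat)) := by
        intro s
        rw [pvKnap_inv k _ hk hnum _ hproc dp hlen hinv s, htake, hgd]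
        rw [pvReach_perm (List.perm_append_singleton _ _).symm]
      have hpre' : ∀ a ∈ snums.take (i + 1), a ≤ x := by
        intro a ha
        rw [htake] at ha
        rcases List.mem_append.1 ha with h' | h'
        · exact hpre a h'
        · simp at h'; subst h'; rwa [hgd] at hle
      have hlen' : (pvKnapLoop (snums.getD i 0) k dp).size = k.toNat + 1 := by
        rw [pvKnapLoop_size]; exact hlen
      have := ih (by omega) hlen' hinv' hpre'
      exact ⟨by omega, this.2.1, this.2.2.1, this.2.2.2.1, this.2.2.2.2⟩
  | case2 i dp h =>
      intro hi hlen hinv hpre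
      rw [pvWhileLoop]; simp only [dif_neg h]
      refine ⟨le_refl _, hi, hpre, ?_, hlen, hinv⟩
      intro a ha
      by_cases hilt : i < snums.length
      · have hgt : x < snums[i] := by
          have := (not_and.1 h) hilt
          rw [List.getD_eq_getElem _ _ hilt] at this; omega
        have hdrop : snums.drop i = snums[i] :: snums.drop (i + 1) :=
          List.drop_eq_getElem_cons hilt
        rw [hdrop] at ha
        rcases List.mem_cons.1 ha with h' | h'
        · omega
        · have hpw : (snums.drop i).Pairwise (· ≤ ·) := hsort.drop
          rw [hdrop] at hpw
          have := (List.pairwise_cons.1 hpw).1 a h'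
          omega
      · rw [List.drop_eq_nil_of_le (by omega)] at ha
        simp at ha

theorem pvScan_iff (dp : Array Bool) (k x cnt : Int) :
    ∀ j : Int, pvScanLoop dp k x cnt j = true ↔
      ∃ jv : Int, j ≤ jv ∧ jv < k + 1 ∧ dp.getD jv.toNat false = true ∧
        0 ≤ k - jv ∧ PySem.Int.mod (k - jv) x = 0 ∧ PySem.Int.floordiv (k - jv) x ≤ cnt := by
  intro j
  induction j using pvScanLoop.induct dp k x cnt with
  | case1 j h hdp hcond =>
      rw [pvScanLoop]; simp only [dif_pos h, if_pos hdp, if_pos hcond]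
      simp only [true_iff]
      exact ⟨j, le_refl _, h, hdp, hcond.1, hcond.2.1, hcond.2.2⟩
  | case2 j h hdp hcond ih =>
      rw [pvScanLoop]; simp only [dif_pos h, if_pos hdp, if_neg hcond]
      rw [ih]
      constructor
      · rintro ⟨jv, h1, h2, h3⟩; exact ⟨jv, by omega, h2, h3⟩
      · rintro ⟨jv, h1, h2, h3, h4⟩
        by_cases hje : jv = j
        · subst hje; exact absurd h4 hcond
        · exact ⟨jv, by omega, h2, h3, h4⟩
  | case3 j h hdp ih =>
      rw [pvScanLoop]; simp only [dif_pos h, if_neg hdp]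
      rw [ih]
      constructor
      · rintro ⟨jv, h1, h2, h3⟩; exact ⟨jv, by omega, h2, h3⟩
      · rintro ⟨jv, h1, h2, h3, h4⟩
        by_cases hje : jv = j
        · subst hje; exact absurd h3 hdp
        · exact ⟨jv, by omega, h2, h3, h4⟩
  | case4 j h =>
      rw [pvScanLoop]; simp only [dif_neg h, Bool.false_eq_true, false_iff]
      rintro ⟨jv, h1, h2, _⟩; omega

theorem pvCap_decomp (x : Int) : ∀ (l : List Int) (m : Int),
    pvReach (l.map (fun v => if v < x then v else x)) m = true ↔
      ∃ j t : Int, pvReach (l.filter (fun v => decide (v ≤ x))) j = true ∧ 0 ≤ t ∧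
        t ≤ (l.countP (fun v => decide (x < v)) : Int) ∧ m = j + t * x := by
  intro l
  induction l with
  | nil =>
      intro m
      simp only [List.map_nil, List.filter_nil, List.countP_nil, pvReach]
      constructor
      · intro h; exact ⟨m, 0, by simpa using h, by omega, by omega, by ring⟩
      · rintro ⟨j, t, h1, h2, h3, h4⟩
        have ht : t = 0 := by omega
        have hj : j = 0 := by simpa using h1
        subst ht; subst hj; simp at h4 ⊢; omega
  | cons v l ih =>
      intro m
      by_cases hv : v ≤ x
      · have hc : (if v < x then v else x) = v := by split <;> omega
        have hcnt : (v :: l).countP (fun v => decide (x < v)) = l.countP (fun v => decide (x < v)) := by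
          rw [List.countP_cons_of_neg]; simp; omega
        have hfil : (v :: l).filter (fun v => decide (v ≤ x))
            = v :: l.filter (fun v => decide (v ≤ x)) := by
          rw [List.filter_cons_of_pos]; simp; omega
        simp only [List.map_cons, hc, pvReach, hcnt, hfil, Bool.or_eq_true, ih]
        constructor
        · rintro (⟨j, t, h1, h2, h3, h4⟩ | ⟨j, t, h1, h2, h3, h4⟩)
          · exact ⟨j, t, by simp [h1], h2, h3, h4⟩
          · refine ⟨j + v, t, ?_, h2, h3, by omega⟩
            simp
            right; simpa using h1
        · rintro ⟨j, t, h1, h2, h3, h4⟩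
          rcases h1 with h' | h'
          · exact Or.inl ⟨j, t, h', h2, h3, h4⟩
          · exact Or.inr ⟨j - v, t, h', h2, h3, by omega⟩
      · have hc : (if v < x then v else x) = x := by split <;> omega
        have hcnt : ((v :: l).countP (fun v => decide (x < v)) : Int)
            = (l.countP (fun v => decide (x < v)) : Int) + 1 := by
          rw [List.countP_cons_of_pos]; · push_cast; ring
          · simp; omega
        have hfil : (v :: l).filter (fun v => decide (v ≤ x))
            = l.filter (fun v => decide (v ≤ x)) := by
          rw [List.filter_cons_of_neg]; simp; omega
        simp only [List.map_cons, hc, pvReach, hcnt, hfil, Bool.or_eq_true, ih]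
        constructor
        · rintro (⟨j, t, h1, h2, h3, h4⟩ | ⟨j, t, h1, h2, h3, h4⟩)
          · exact ⟨j, t, h1, h2, by omega, h4⟩
          · refine ⟨j, t + 1, h1, by omega, by omega, ?_⟩
            have : (t + 1) * x = t * x + x := by ring
            omega
        · rintro ⟨j, t, h1, h2, h3, h4⟩
          by_cases ht : t ≤ (l.countP (fun v => decide (x < v)) : Int)
          · exact Or.inl ⟨j, t, h1, h2, ht, h4⟩
          · have ht1 : 1 ≤ t := by omega
            refine Or.inr ⟨j, t - 1, h1, by omega, by omega, ?_⟩
            have : t * x = (t - 1) * x + x := by ring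
            omega

theorem pvFound_eq_sem (nums : List Int) (k x : Int) (hx : 0 < x)
    (hnn : ∀ v ∈ nums, 0 ≤ v)
    (snums : List Int) (hperm : snums.Perm nums)
    (i' : Nat) (hi' : i' ≤ snums.length)
    (htk : ∀ a ∈ snums.take i', a ≤ x) (hdr : ∀ a ∈ snums.drop i', x < a)
    (dp' : Array Bool)
    (hinv : ∀ s : Nat, dp'.getD s false
      = (pvReach (snums.take i') (s : Int) && decide (s ≤ k.toNat))) :
    pvScanLoop dp' k x ((nums.length : Int) - (i' : Int)) 0 = pvSem nums k x := by
  have hnns : ∀ v ∈ snums, 0 ≤ v := fun v hv => hnn v (hperm.mem_iff.1 hv)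
  -- the processed prefix is exactly the (≤ x)-elements
  have hsplit : snums.take i' ++ snums.drop i' = snums := List.take_append_drop _ _
  have hfeq : snums.filter (fun v => decide (v ≤ x)) = snums.take i' := by
    conv_lhs => rw [← hsplit]
    rw [List.filter_append, List.filter_eq_self.2 (by intro a ha; simpa using htk a ha),
      List.filter_eq_nil_iff.2 (by intro a ha; have := hdr a ha; simp; omega), List.append_nil]
  have hreach_take : ∀ s, pvReach (snums.take i') s
      = pvReach (nums.filter (fun v => decide (v ≤ x))) s := by
    intro s
    rw [← hfeq]
    exact pvReach_perm (hperm.filter _) s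
  have hlen : snums.length = nums.length := hperm.length_eq
  have hcnt : (nums.length : Int) - (i' : Int) = (nums.countP (fun v => decide (x < v)) : Int) := by
    have h1 : nums.countP (fun v => decide (x < v)) = snums.countP (fun v => decide (x < v)) :=
      (hperm.countP_eq _).symm
    have h2 : snums.countP (fun v => decide (x < v))
        = (snums.take i').countP (fun v => decide (x < v))
          + (snums.drop i').countP (fun v => decide (x < v)) := by
      conv_lhs => rw [← hsplit]
      rw [List.countP_append]
    have h3 : (snums.take i').countP (fun v => decide (x < v)) = 0 := by
      rw [List.countP_eq_zero]
      intro a ha; have := htk a ha; simp; omega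
    have h4 : (snums.drop i').countP (fun v => decide (x < v)) = (snums.drop i').length := by
      rw [List.countP_eq_length]
      intro a ha; have := hdr a ha; simp; omega
    have h5 : (snums.drop i').length = snums.length - i' := List.length_drop ..
    omega
  have hfnn : ∀ a ∈ nums.filter (fun v => decide (v ≤ x)), 0 ≤ a :=
    fun a ha => hnn a (List.mem_of_mem_filter ha)
  rw [Bool.eq_iff_iff, pvScan_iff, pvSem, pvCap_decomp]
  constructor
  · rintro ⟨jv, h0, hlt, hdp, hge, hmod, hdiv⟩
    rw [hinv] at hdp
    have hdp' := Bool.and_eq_true_iff.1 hdp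
    have hcast : ((jv.toNat : Nat) : Int) = jv := by omega
    have hreach : pvReach (nums.filter (fun v => decide (v ≤ x))) jv = true := by
      rw [← hreach_take]
      rw [← hcast]; exact hdp'.1
    have hdvd : x ∣ (k - jv) := by
      rw [PySem.Int.mod_eq_emod_of_pos hx] at hmod
      exact Int.dvd_of_emod_eq_zero hmod
    refine ⟨jv, PySem.Int.floordiv (k - jv) x, hreach, ?_, ?_, ?_⟩
    · rw [PySem.Int.floordiv_eq_ediv_of_pos hx]
      exact Int.ediv_nonneg hge (le_of_lt hx)
    · omega
    · rw [PySem.Int.floordiv_eq_ediv_of_pos hx, Int.ediv_mul_cancel hdvd]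
      omega
  · rintro ⟨j, t, hreach, ht0, htc, hm⟩
    have hj0 : 0 ≤ j := by
      by_contra hneg
      rw [pvReach_neg hfnn j (by omega)] at hreach
      exact Bool.false_ne_true hreach
    have htx : 0 ≤ t * x := mul_nonneg ht0 (le_of_lt hx)
    refine ⟨j, by omega, by omega, ?_, by omega, ?_, ?_⟩
    · rw [hinv]
      have hcast : ((j.toNat : Nat) : Int) = j := by omega
      rw [Bool.and_eq_true_iff]
      constructor
      · rw [hreach_take, hcast]; exact hreach
      · simp; omega
    · have : k - j = t * x := by omega
      rw [this, PySem.Int.mod_eq_emod_of_pos hx]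
      exact Int.mul_emod_left t x
    · have : k - j = t * x := by omega
      rw [this, PySem.Int.floordiv_eq_ediv_of_pos hx, Int.mul_ediv_cancel t (ne_of_gt hx)]
      omega

theorem pvAlt_elem (nums : List Int) (k x : Int) (hk : 0 ≤ k) (hx : 0 < x)
    (hnn : ∀ v ∈ nums, 0 ≤ v) :
    (((nums.foldl (pvCapStep k x) 1) >>> k.toNat) &&& 1 == 1) = pvSem nums k x := by
  have hinit : ∀ s : Nat, (1 : Nat).testBit s
      = (pvReach ([] : List Int) (s : Int) && decide (s ≤ k.toNat)) := by
    intro s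
    rw [show (1 : Nat) = 2 ^ 1 - 1 from rfl, Nat.testBit_two_pow_sub_one]
    by_cases hs : s = 0
    · subst hs; simp [pvReach]
    · simp [pvReach, hs]
  have hfold := pvCapFold_testBit k x hk (le_of_lt hx) nums [] 1 hnn (by simp) hinit k.toNat
  have hext : (((nums.foldl (pvCapStep k x) 1) >>> k.toNat) &&& 1 == 1)
      = (nums.foldl (pvCapStep k x) 1).testBit k.toNat := by
    simp [Nat.testBit, Nat.and_comm]
  rw [hext, hfold, List.append_nil]
  rw [pvReach_perm ((nums.map (fun v => if v < x then v else x)).reverse_perm)]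
  rw [show ((k.toNat : Nat) : Int) = k by omega]
  simp [pvSem]

theorem pvOuter_eq (nums : List Int) (k : Int) (hk : 0 ≤ k)
    (hnn : ∀ v ∈ nums, 0 ≤ v) (snums : List Int) (hperm : snums.Perm nums)
    (hsort : snums.Pairwise (· ≤ ·)) :
    ∀ (f : Nat) (x : Int) (i : Nat) (dp : Array Bool) (answer : List Bool),
      (((nums.length : Int) + 1 - x).toNat = f) →
      1 ≤ x → i ≤ snums.length →
      answer.length = nums.length →
      dp.size = k.toNat + 1 →
      (∀ s : Nat, dp.getD s false = (pvReach (snums.take i) (s : Int) && decide (s ≤ k.toNat))) →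
      (∀ a ∈ snums.take i, a ≤ x) →
      (∀ m : Nat, (x - 1).toNat ≤ m → answer.getD m false = false) →
      pvOuterLoop snums k nums.length x answer i dp
        = answer.take (x - 1).toNat
          ++ (PySem.List.pyRange x ((nums.length : Int) + 1) 1).map (fun y => pvSem nums k y) := by
  intro f
  induction f with
  | zero =>
      intro x i dp answer hf h1x hi hla hld hinv htk hzero
      rw [pvOuterLoop]
      rw [dif_neg (by omega)]
      rw [PySem.List.pyRange_one_eq_nil (by omega), List.map_nil, List.append_nil,
        List.take_of_length_le (by omega)]
  | succ f ih =>
      intro x i dp answer hf h1x hi hla hld hinv htk hzero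
      rw [pvOuterLoop]
      by_cases hxn : x < (nums.length : Int) + 1
      · rw [dif_pos hxn]
        have hnns : ∀ v ∈ snums, 0 ≤ v := fun v hv => hnn v (hperm.mem_iff.1 hv)
        have hW := pvWhile_inv k x hk snums hsort hnns i dp hi hld hinv htk
        obtain ⟨hii', hi'n, htk', hdr', hlen', hinv'⟩ := hW
        have hslen : snums.length = nums.length := hperm.length_eq
        set i' := (pvWhileLoop snums k x i dp).1 with hi'def
        set dp' := (pvWhileLoop snums k x i dp).2 with hdp'def
        have hfound : pvScanLoop dp' k x ((nums.length : Int) - (i' : Int)) 0 = pvSem nums k x := by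
          exact pvFound_eq_sem nums k x (by omega) hnn snums hperm i' hi'n htk' hdr' dp' hinv'
        -- the new answer list
        set p : Nat := (x - 1).toNat with hpdef
        have hpl : p < answer.length := by omega
        set found := pvScanLoop dp' k x ((nums.length : Int) - (i' : Int)) 0 with hfdef
        set answer' := if found then answer.set p true else answer with ha'def
        have hlen'' : answer'.length = nums.length := by
          rw [ha'def]; split <;> simp [hla]
        have htake' : answer'.take ((x + 1 - 1).toNat)
            = answer.take p ++ [found] := by
          have hx1 : (x + 1 - 1).toNat = p + 1 := by omega
          rw [hx1, ha'def]
          by_cases hfo : found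
          · rw [if_pos hfo, List.take_add_one]
            have h1 : (answer.set p true).take p = answer.take p := by
              apply List.ext_getElem <;> simp [List.getElem_take, List.getElem_set]
              intro i h1 h2 h3; omega
            rw [h1, List.getElem?_set_self hpl]
            simp [hfo]
          · rw [if_neg hfo, List.take_add_one]
            have h2 : answer[p]? = some false := by
              have := hzero p (le_refl _)
              rw [List.getD_eq_getElem?_getD] at this
              rw [List.getElem?_eq_getElem hpl] at this ⊢
              simpa using this
            rw [h2]
            simp at hfo
            simp [hfo]
        have hzero' : ∀ m : Nat, (x + 1 - 1).toNat ≤ m → answer'.getD m false = false := by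
          intro m hm
          have hm' : p < m := by omega
          have h1 : answer'.getD m false = answer.getD m false := by
            rw [ha'def]; split
            · simp [List.getD_eq_getElem?_getD, List.getElem?_set_ne (show p ≠ m by omega)]
            · rfl
          rw [h1]; exact hzero m (by omega)
        have htk'' : ∀ a ∈ snums.take i', a ≤ x + 1 := by
          intro a ha; have := htk' a ha; omega
        have hrec := ih (x + 1) i' dp' answer' (by omega) (by omega) hi'n hlen'' hlen' hinv' htk'' hzero'
        show pvOuterLoop snums k nums.length (x + 1) answer' i' dp' = _
        rw [hrec, htake', PySem.List.pyRange_one_cons hxn, List.map_cons, ← hfound]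
        simp [List.append_assoc]
      · omega

theorem pvMain (nums : List Int) (k : Int) (hk : 0 ≤ k) (hnn : ∀ v ∈ nums, 0 ≤ v) :
    subsequenceSumAfterCapping nums k = subsequenceSumAfterCapping_alt nums k := by
  unfold subsequenceSumAfterCapping subsequenceSumAfterCapping_alt
  have hperm : (PySem.List.sorted nums (fun v => v) false).Perm nums :=
    PySem.List.sorted_perm nums (fun v => v) false
  have hsort : (PySem.List.sorted nums (fun v => v) false).Pairwise (· ≤ ·) := by
    simpa using PySem.List.sorted_pairwise (xs := nums) (key := fun v => v)
  have hld : ((Array.replicate (k + 1).toNat false).setIfInBounds 0 true).size = k.toNat + 1 := by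
    simp; omega
  have hinv0 : ∀ s : Nat, ((Array.replicate (k + 1).toNat false).setIfInBounds 0 true).getD s false
      = (pvReach ((PySem.List.sorted nums (fun v => v) false).take 0) (s : Int)
          && decide (s ≤ k.toNat)) := by
    intro s
    rw [List.take_zero]
    by_cases hs : s = 0
    · subst hs
      have h0 : (0 : Nat) < ((Array.replicate (k + 1).toNat false).size) := by simp; omega
      rw [pvAGetD_set_self _ _ _ h0]
      simp [pvReach]
    · have h1 : ((Array.replicate (k + 1).toNat false).setIfInBounds 0 true).getD s false = false := by
        rw [pvAGetD_set_ne _ _ _ _ (by omega)]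
        simp [Array.getD]
      rw [h1]
      have h2 : pvReach [] (s : Int) = false := by simp [pvReach]; omega
      rw [h2, Bool.false_and]
  have hzero : ∀ m : Nat, ((1 : Int) - 1).toNat ≤ m →
      (List.replicate nums.length false).getD m false = false := by
    intro m _
    simp [List.getD_eq_getElem?_getD, List.getElem?_replicate]
    split <;> rfl
  have hmain := pvOuter_eq nums k hk hnn (PySem.List.sorted nums (fun v => v) false) hperm hsort
    (((nums.length : Int) + 1 - 1).toNat) 1 0
    ((Array.replicate (k + 1).toNat false).setIfInBounds 0 true)
    (List.replicate nums.length false) rfl (le_refl 1)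
    (by omega) (by simp) hld hinv0 (by simp) hzero
  rw [hmain]
  have : ((1 : Int) - 1).toNat = 0 := by omega
  rw [this, List.take_zero, List.nil_append]
  apply List.map_congr_left
  intro x hx
  have hx1 : 1 ≤ x := (PySem.List.mem_pyRange_one.1 hx).1
  exact (pvAlt_elem nums k x hk (by omega) hnn).symm

-- ===== VERDICT (by name: the statement is the Claim_ definition above) =====
theorem subsequenceSumAfterCapping_spec : Claim_equal_subsequenceSumAfterCapping := by
  intro nums k _hdom hpre
  unfold Spec_subsequenceSumAfterCapping
  exact pvMain nums k hpre.1 hpre.2
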